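-- pv_equiv track=rewrite | github.com/Ivano0ovIvan/programing_fundamentals_python | text_processing_exercise/winning_ticket.py | is_winning
-- ===== SOURCE A (Python) =====
-- def is_winning(ticket):
--     if len(ticket) != 20:
--         return "invalid ticket"
--     winning_symbols = ['@', '#', '$', '^']
--     left_part = ticket[:10]
--     right_part = ticket[10:]
--     for match_symbol in winning_symbols:
--         for uninterrupted_match_length in range(10, 5, -1):
--             winning_repetitions = match_symbol * uninterrupted_match_length
--             if winning_repetitions in left_part and winning_repetitions in right_part:
--                 if uninterrupted_match_length == 10: # we have jackpot here
--                     return f'ticket "{ticket}" - {uninterrupted_match_length}{match_symbol} Jackpot!'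
--                 else: # we have winning ticket
--                     return f'ticket "{ticket}" - {uninterrupted_match_length}{match_symbol}'
--     return f'ticket "{ticket}" - no match'
-- ===== SOURCE B (Python) =====
-- def _max_run(part, sym):
--     cur = best = 0
--     for ch in part:
--         if ch == sym:
--             cur += 1
--             if cur > best:
--                 best = cur
--         else:
--             cur = 0
--     return best
--
--
-- def is_winning(ticket):
--     if len(ticket) != 20:
--         return "invalid ticket"
--     left, right = ticket[:10], ticket[10:]
--     for sym in "@#$^":
--         m = min(_max_run(left, sym), _max_run(right, sym))
--         if m >= 6:
--             tail = " Jackpot!" if m == 10 else ""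
--             return f'ticket "{ticket}" - {m}{sym}{tail}'
--     return f'ticket "{ticket}" - no match'
-- ===== Notes on version B (the rewrite author's own statement) =====
-- stated objective: alternative
-- what changed: A tests, for each symbol and each length 10..6, whether the repeated-symbol substring occurs in both halves (repeated substring searches); B makes one linear run-length scan per half and symbol, takes min(run_left, run_right) and decides directly from that number.
import Mathlib
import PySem

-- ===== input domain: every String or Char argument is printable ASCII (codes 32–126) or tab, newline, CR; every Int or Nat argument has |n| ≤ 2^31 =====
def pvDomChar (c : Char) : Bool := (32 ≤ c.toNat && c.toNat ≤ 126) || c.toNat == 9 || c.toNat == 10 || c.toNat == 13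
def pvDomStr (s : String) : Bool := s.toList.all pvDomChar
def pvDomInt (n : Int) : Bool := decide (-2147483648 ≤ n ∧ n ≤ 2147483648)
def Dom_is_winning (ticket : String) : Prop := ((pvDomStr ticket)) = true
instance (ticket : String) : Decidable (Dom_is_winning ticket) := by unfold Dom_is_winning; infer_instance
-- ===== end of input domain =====

-- B replaces A's repeated substring searches (symbol*k in each half, k = 10..6) by one
-- linear run-length scan per half and symbol, deciding from min(run_left, run_right).

-- ===== PORT A =====
-- inner loop: for uninterrupted_match_length in range(10, 5, -1)
def isWinningInnerA (ticket left right : List Char) (sym : Char) : List Int → Option String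
  | [] => none
  | k :: ks =>
    let rep := PySem.List.pyRepeat [sym] k
    if PySem.Chars.isIn rep left && PySem.Chars.isIn rep right then
      if k == 10 then
        some (String.ofList ("ticket \"".toList ++ ticket ++ "\" - ".toList ++
          PySem.Int.toChars k ++ [sym] ++ " Jackpot!".toList))
      else
        some (String.ofList ("ticket \"".toList ++ ticket ++ "\" - ".toList ++
          PySem.Int.toChars k ++ [sym]))
    else isWinningInnerA ticket left right sym ks

-- outer loop: for match_symbol in winning_symbols
def isWinningSymsA (ticket left right : List Char) : List Char → Option String
  | [] => none
  | s :: ss =>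
    match isWinningInnerA ticket left right s (PySem.List.pyRange 10 5 (-1)) with
    | some r => some r
    | none => isWinningSymsA ticket left right ss

def is_winning (ticket : String) : String :=
  if PySem.Str.len ticket ≠ 20 then "invalid ticket"
  else
    let tl := ticket.toList
    let left := PySem.List.slice tl none (some 10)
    let right := PySem.List.slice tl (some 10) none
    match isWinningSymsA tl left right ['@', '#', '$', '^'] with
    | some r => r
    | none => String.ofList ("ticket \"".toList ++ tl ++ "\" - no match".toList)

-- ===== PORT B =====
-- longest run of sym in part: linear scan with (cur, best)
def maxRunScan (part : List Char) (sym : Char) : Nat :=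
  (part.foldl (fun (s : Nat × Nat) ch =>
    if ch = sym then (s.1 + 1, if s.1 + 1 > s.2 then s.1 + 1 else s.2)
    else (0, s.2)) (0, 0)).2

def isWinningSymsB (ticket left right : List Char) : List Char → Option String
  | [] => none
  | s :: ss =>
    let m := min (maxRunScan left s) (maxRunScan right s)
    if 6 ≤ m then
      let tail := if m == 10 then " Jackpot!".toList else []
      some (String.ofList ("ticket \"".toList ++ ticket ++ "\" - ".toList ++
        PySem.Int.toChars (m : Int) ++ [s] ++ tail))
    else isWinningSymsB ticket left right ss

def is_winning_alt (ticket : String) : String :=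
  if PySem.Str.len ticket ≠ 20 then "invalid ticket"
  else
    let tl := ticket.toList
    let left := tl.take 10
    let right := tl.drop 10
    match isWinningSymsB tl left right ['@', '#', '$', '^'] with
    | some r => r
    | none => String.ofList ("ticket \"".toList ++ tl ++ "\" - no match".toList)

-- ===== PRECONDITION & SPEC =====
def Spec_is_winning (ticket : String) (out : String) : Prop := out = is_winning_alt ticket
instance (ticket : String) (out : String) : Decidable (Spec_is_winning ticket out) := by unfold Spec_is_winning; infer_instance

-- ===== CLAIM (what is proved, stated in full; the proofs are below) =====
def Claim_equal_is_winning : Prop := ∀ (ticket : String), Dom_is_winning ticket → Spec_is_winning ticket (is_winning ticket)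

-- ===== LEMMAS AND PROOFS =====

-- length of the maximal all-sym prefix
def headRun (c : Char) : List Char → Nat
  | [] => 0
  | x :: xs => if x = c then headRun c xs + 1 else 0

-- longest run of c anywhere in the list (proof-side characterisation)
def maxRun (c : Char) : List Char → Nat
  | [] => 0
  | x :: xs => max (headRun c (x :: xs)) (maxRun c xs)

theorem headRun_le_maxRun (c : Char) (l : List Char) : headRun c l ≤ maxRun c l := by
  cases l with
  | nil => simp [headRun, maxRun]
  | cons x xs => simp [maxRun]

theorem maxRun_le_length (c : Char) (l : List Char) : maxRun c l ≤ l.length := by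
  induction l with
  | nil => simp [maxRun]
  | cons x xs ih =>
    have h : headRun c (x :: xs) ≤ (x :: xs).length := by
      clear ih
      induction (x :: xs) with
      | nil => simp [headRun]
      | cons y ys ih2 => by_cases hy : y = c <;> simp [headRun, hy] <;> omega
    simp only [maxRun]
    simp only [List.length_cons] at *
    omega

theorem replicate_prefix_iff (c : Char) (k : Nat) (l : List Char) :
    List.replicate k c <+: l ↔ k ≤ headRun c l := by
  induction l generalizing k with
  | nil =>
    cases k with
    | zero => simp [headRun]
    | succ n => simp [List.replicate_succ, headRun]
  | cons x xs ih =>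
    cases k with
    | zero => simp [List.nil_prefix]
    | succ n =>
      rw [List.replicate_succ, List.cons_prefix_cons]
      by_cases hx : x = c
      · simp [headRun, hx, ih]
      · simp [headRun, hx]
        intro h
        exact (hx h.symm).elim

theorem replicate_infix_iff (c : Char) (k : Nat) (l : List Char) :
    List.replicate k c <:+: l ↔ k ≤ maxRun c l := by
  induction l with
  | nil =>
    cases k with
    | zero => simp [maxRun]
    | succ n => simp [List.replicate_succ, maxRun]
  | cons x xs ih =>
    rw [List.infix_cons_iff, replicate_prefix_iff, ih]
    simp only [maxRun]
    omega

theorem scan_invariant (c : Char) (l : List Char) (cur best : Nat) (h : cur ≤ best) :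
    (l.foldl (fun (s : Nat × Nat) ch =>
      if ch = c then (s.1 + 1, if s.1 + 1 > s.2 then s.1 + 1 else s.2)
      else (0, s.2)) (cur, best)).2
    = max best (max (cur + headRun c l) (maxRun c l)) := by
  induction l generalizing cur best with
  | nil => simp [headRun, maxRun]; omega
  | cons x xs ih =>
    by_cases hx : x = c
    · simp only [List.foldl_cons, if_pos hx]
      rw [ih (cur + 1) (if cur + 1 > best then cur + 1 else best) (by split_ifs <;> omega)]
      simp only [headRun, maxRun, if_pos hx]
      have h2 := headRun_le_maxRun c xs
      split_ifs <;> omega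
    · simp only [List.foldl_cons, if_neg hx]
      rw [ih 0 best (Nat.zero_le _)]
      simp only [headRun, maxRun, if_neg hx]
      have h2 := headRun_le_maxRun c xs
      omega

theorem maxRunScan_eq (l : List Char) (c : Char) : maxRunScan l c = maxRun c l := by
  unfold maxRunScan
  rw [scan_invariant c l 0 0 le_rfl]
  have h2 := headRun_le_maxRun c l
  omega

theorem isIn_replicate (c : Char) (k : Nat) (l : List Char) :
    PySem.Chars.isIn (List.replicate k c) l = decide (k ≤ maxRunScan l c) := by
  rw [maxRunScan_eq]
  by_cases h : k ≤ maxRun c l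
  · simp only [h, decide_true]
    rw [PySem.Chars.isIn_iff_infix, replicate_infix_iff]
    exact h
  · simp only [h, decide_false]
    rw [PySem.Chars.isIn_eq_false_iff, replicate_infix_iff]
    exact h

theorem inner_eq (ticket left right : List Char) (sym : Char)
    (hL : maxRunScan left sym ≤ 10) (hR : maxRunScan right sym ≤ 10) :
    isWinningInnerA ticket left right sym (PySem.List.pyRange 10 5 (-1)) =
    (let m := min (maxRunScan left sym) (maxRunScan right sym)
     if 6 ≤ m then
       some (String.ofList ("ticket \"".toList ++ ticket ++ "\" - ".toList ++
         PySem.Int.toChars (m : Int) ++ [sym] ++ (if m == 10 then " Jackpot!".toList else [])))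
     else none) := by
  have hrange : PySem.List.pyRange 10 5 (-1) = [10, 9, 8, 7, 6] := by decide
  rw [hrange]
  simp only [isWinningInnerA, PySem.List.pyRepeat_singleton]
  rw [show ((10:Int).toNat) = 10 from rfl, show ((9:Int).toNat) = 9 from rfl,
      show ((8:Int).toNat) = 8 from rfl, show ((7:Int).toNat) = 7 from rfl,
      show ((6:Int).toNat) = 6 from rfl]
  simp only [isIn_replicate]
  set a := maxRunScan left sym with ha
  set b := maxRunScan right sym with hb
  clear_value a b
  interval_cases a <;> interval_cases b <;> simp

theorem syms_eq' (ticket left right : List Char) (syms : List Char)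
    (hL : left.length = 10) (hR : right.length = 10) :
    isWinningSymsA ticket left right syms = isWinningSymsB ticket left right syms := by
  induction syms with
  | nil => rfl
  | cons s ss ih =>
    have hLs : maxRunScan left s ≤ 10 := by
      rw [maxRunScan_eq]; have := maxRun_le_length s left; omega
    have hRs : maxRunScan right s ≤ 10 := by
      rw [maxRunScan_eq]; have := maxRun_le_length s right; omega
    simp only [isWinningSymsA, isWinningSymsB, inner_eq ticket left right s hLs hRs]
    by_cases h6 : 6 ≤ min (maxRunScan left s) (maxRunScan right s)
    · simp [h6]
    · simp [h6, ih]

-- ===== VERDICT (by name: the statement is the Claim_ definition above) =====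
theorem is_winning_spec : Claim_equal_is_winning := by
  intro ticket _
  unfold Spec_is_winning is_winning is_winning_alt
  split_ifs with h
  · rfl
  · have h20 : PySem.Str.len ticket = 20 := not_not.mp h
    rw [PySem.Str.len_eq] at h20
    have hlen : ticket.toList.length = 20 := by exact_mod_cast h20
    have hslice1 : PySem.List.slice ticket.toList none (some 10) = ticket.toList.take 10 := by
      rw [PySem.List.slice_to ticket.toList (by norm_num : (0:Int) ≤ 10)]
      rfl
    have hslice2 : PySem.List.slice ticket.toList (some 10) none = ticket.toList.drop 10 := by
      rw [PySem.List.slice_from ticket.toList (by norm_num : (0:Int) ≤ 10)]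
      rfl
    simp only [hslice1, hslice2,
      syms_eq' ticket.toList (List.take 10 ticket.toList) (List.drop 10 ticket.toList)
        ['@', '#', '$', '^'] (by simp [hlen]) (by simp [hlen])]
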